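-- pv_equiv track=rewrite | github.com/bu119/Algorithm | 프로그래머스/3/64064. 불량 사용자/불량 사용자.py | solution
-- ===== SOURCE A (Python) =====
-- def solution(user_id, banned_id):
--
--     # 불량 사용자가 될 수 있는 지 확인
--     def is_banned_user(a, b):
--         # a: 불량사용자
--         # b: 불량사용자 후보
--         k = len(a)
--         for i in range(k):
--             # "*"이 아니고, 두 문자가 같지 않으면 False 반환
--             if a[i] != "*" and a[i] != b[i]:
--                 return False
--         return True
--
--     # 불량 사용자 후보 가져오기
--     def find_banned_candidates(banned_users, users):
--         # 불량 사용자 후보 저장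
--         candidates = dict()
--         for i in range(n):
--             banned_user = banned_users[i]
--             x = len(banned_user)
--             candidates[i] = set()
--             for j in range(m):
--                 candidate = users[j]
--                 y = len(candidate)
--                 # 아이디 길이가 같고 불량 사용자 후보이면
--                 if x == y and is_banned_user(banned_user, candidate):
--                     # 불량 후보로 저장
--                     candidates[i].add(j)
--         return candidates
--
--     # 제재 아이디 목록 찾기
--     def dfs(banned_idx):
--         if banned_idx == n:
--             answer.add(tuple(sorted(visited)))
--             return
--         # 불량 사용자 후보 탐색
--         for user in banned_candidates[banned_idx]:
--             if user not in visited: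
--                 visited.add(user)
--                 dfs(banned_idx+1)
--                 visited.remove(user)
--
--     # 제재 아이디 개수
--     n = len(banned_id)
--     # 사용자 수
--     m = len(user_id)
--     # 제재 아이디 목록 저장
--     answer = set()
--     banned_candidates = find_banned_candidates(banned_id, user_id)
--     # 현재 탐색에서 선정된 제재 아이디 방문 체크
--     visited = set()
--     dfs(0)
--
--     return len(answer)
-- ===== SOURCE B (Python) =====
-- def solution(user_id, banned_id):
--     # Per-pattern candidate lists: user indices whose id has the same length
--     # and matches the pattern character-wise ('*' is a wildcard).
--     def matches(p, u):
--         return len(p) == len(u) and all(pc == "*" or pc == uc for pc, uc in zip(p, u))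
--
--     cands = [[j for j, u in enumerate(user_id) if matches(p, u)] for p in banned_id]
--
--     # Flat cartesian product over the candidate lists, built iteratively.
--     combos = [[]]
--     for c in cands:
--         combos = [sel + [j] for sel in combos for j in c]
--
--     # Keep only combinations of pairwise-distinct users; count distinct sorted tuples.
--     n = len(banned_id)
--     seen = set()
--     for sel in combos:
--         if len(set(sel)) == n:
--             seen.add(tuple(sorted(sel)))
--     return len(seen)
-- ===== Notes on version B (the rewrite author's own statement) =====
-- stated objective: alternative
-- what changed: Replaces A's pruned backtracking DFS with a visited-set over per-pattern candidate sets by a flat cartesian product of the candidate lists followed by a pairwise-distinctness filter (len(set(sel)) == n) before deduplicating sorted tuples.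
import Mathlib
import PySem

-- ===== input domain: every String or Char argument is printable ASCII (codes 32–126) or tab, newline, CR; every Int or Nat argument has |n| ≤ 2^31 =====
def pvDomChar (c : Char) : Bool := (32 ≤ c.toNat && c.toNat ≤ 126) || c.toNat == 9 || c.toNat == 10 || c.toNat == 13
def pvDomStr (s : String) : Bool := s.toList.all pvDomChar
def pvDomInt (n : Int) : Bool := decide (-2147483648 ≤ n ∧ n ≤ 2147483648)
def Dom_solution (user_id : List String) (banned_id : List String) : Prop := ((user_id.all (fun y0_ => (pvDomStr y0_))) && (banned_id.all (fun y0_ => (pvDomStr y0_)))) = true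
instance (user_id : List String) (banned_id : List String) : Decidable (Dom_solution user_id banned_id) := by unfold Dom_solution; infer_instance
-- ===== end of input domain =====

-- B replaces A's pruned backtracking DFS over candidate sets by a flat cartesian
-- product of the candidate lists followed by a distinctness filter (objective: alternative).

-- ===== PORT A =====
-- a[i]/b[i] are in range at every call site (the caller checks the lengths are equal),
-- so List.getD here is exact for Python's string indexing.
def isBannedUserA (a b : List Char) : Bool :=
  (List.range a.length).all fun i => !(a.getD i ' ' != '*' && a.getD i ' ' != b.getD i ' ')

def candForA (bu : String) (users : List String) : PySem.Set Int :=
  (List.range users.length).foldl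
    (fun s j =>
      let cand := users.getD j ""
      if bu.toList.length == cand.toList.length && isBannedUserA bu.toList cand.toList
      then PySem.Set.add s (j : Int) else s)
    PySem.Set.empty

def dfsA (rem : List (PySem.Set Int)) (visited : PySem.Set Int)
    (answer : PySem.Set (List Int)) : PySem.Set (List Int) :=
  match rem with
  | [] => PySem.Set.add answer (PySem.List.sorted visited (fun x => x) false)
  | c :: rest =>
      c.foldl (fun ans user =>
        if PySem.Set.contains visited user then ans
        else dfsA rest (PySem.Set.add visited user) ans) answer

def solution (user_id : List String) (banned_id : List String) : Int :=
  PySem.Set.len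
    (dfsA (banned_id.map fun bu => candForA bu user_id) PySem.Set.empty PySem.Set.empty)

-- ===== PORT B =====
def matchesB (p u : String) : Bool :=
  p.toList.length == u.toList.length &&
    (p.toList.zip u.toList).all fun pc => pc.1 == '*' || pc.1 == pc.2

def solution_alt (user_id : List String) (banned_id : List String) : Int :=
  let cands : List (List Int) := banned_id.map fun p =>
    (PySem.List.enumerate user_id).filterMap fun ju => if matchesB p ju.2 then some ju.1 else none
  let combos : List (List Int) :=
    cands.foldl (fun cs c => cs.flatMap fun sel => c.map fun j => sel ++ [j]) [[]]
  let n := banned_id.length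
  let seen : PySem.Set (List Int) := combos.foldl
    (fun s sel => if (PySem.Set.ofList sel).length == n
      then PySem.Set.add s (PySem.List.sorted sel (fun x => x) false) else s)
    PySem.Set.empty
  PySem.Set.len seen

-- ===== PRECONDITION & SPEC =====
def Spec_solution (user_id : List String) (banned_id : List String) (out : Int) : Prop := out = solution_alt user_id banned_id
instance (user_id : List String) (banned_id : List String) (out : Int) : Decidable (Spec_solution user_id banned_id out) := by unfold Spec_solution; infer_instance

-- ===== CLAIM (what is proved, stated in full; the proofs are below) =====
def Claim_equal_solution : Prop := ∀ (user_id : List String) (banned_id : List String), Dom_solution user_id banned_id → Spec_solution user_id banned_id (solution user_id banned_id)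

-- ===== LEMMAS AND PROOFS =====

-- "sel is a valid pick from the candidate lists": one member of each list, in order
def Picks (cands : List (List Int)) (sel : List Int) : Prop :=
  List.Forall₂ (fun c j => j ∈ c) cands sel

lemma isBanned_zip (a b : List Char) (h : a.length = b.length) :
    isBannedUserA a b = (a.zip b).all fun pc => pc.1 == '*' || pc.1 == pc.2 := by
  unfold isBannedUserA
  rw [Bool.eq_iff_iff, List.all_eq_true, List.all_eq_true]
  constructor
  · intro H pc hpc
    obtain ⟨i, hi, rfl⟩ := List.mem_iff_getElem.mp hpc
    have hia : i < a.length := by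
      simp only [List.length_zip] at hi; omega
    have hib : i < b.length := by omega
    have := H i (List.mem_range.mpr hia)
    simp only [List.getD_eq_getElem a ' ' hia, List.getD_eq_getElem b ' ' hib] at this
    simp only [List.getElem_zip]
    revert this
    cases h1 : (a[i] == '*') <;> cases h2 : (a[i] == b[i]) <;> simp_all
  · intro H i hi
    have hia : i < a.length := List.mem_range.mp hi
    have hib : i < b.length := by omega
    have hmem : (a[i], b[i]) ∈ a.zip b := by
      refine List.mem_iff_getElem.mpr ⟨i, by simp [List.length_zip]; omega, by simp [List.getElem_zip]⟩
    have := H _ hmem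
    simp only [List.getD_eq_getElem a ' ' hia, List.getD_eq_getElem b ' ' hib]
    revert this
    cases h1 : (a[i] == '*') <;> cases h2 : (a[i] == b[i]) <;> simp_all

lemma guard_eq_matchesB (p u : String) :
    (p.toList.length == u.toList.length && isBannedUserA p.toList u.toList) = matchesB p u := by
  unfold matchesB
  by_cases h : p.toList.length = u.toList.length
  · rw [isBanned_zip _ _ h]
  · have hf : (p.toList.length == u.toList.length) = false := by simpa using h
    rw [hf]; simp

-- the enumerate-comprehension of B, index-by-index
lemma filterMap_enumerate (q : String → Bool) (users : List String) :
    ∀ s : Nat,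
      (PySem.List.enumerate users ((s : Nat) : Int)).filterMap
          (fun ju => if q ju.2 then some ju.1 else none)
        = (List.range users.length).filterMap
            (fun j => if q (users.getD j "") then some (((s + j : Nat) : Nat) : Int) else none) := by
  induction users with
  | nil => intro s; simp [PySem.List.enumerate]
  | cons u us ih =>
    intro s
    rw [PySem.List.enumerate_cons]
    rw [show ((s : Nat) : Int) + 1 = (((s + 1 : Nat) : Nat) : Int) by push_cast; ring]
    rw [List.filterMap_cons, List.length_cons, List.range_succ_eq_map,
      List.filterMap_cons, List.filterMap_map, ih (s + 1)]
    have htail : (List.range us.length).filterMap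
          ((fun j => if q ((u :: us).getD j "") then some (((s + j : Nat) : Nat) : Int) else none)
            ∘ Nat.succ)
        = (List.range us.length).filterMap
            (fun j => if q (us.getD j "") then some (((s + 1 + j : Nat) : Nat) : Int) else none) := by
      apply List.filterMap_congr
      intro j _
      simp only [Function.comp_apply, Nat.succ_eq_add_one, List.getD_cons_succ]
      rw [show s + (j + 1) = s + 1 + j by omega]
    rw [htail]
    by_cases hq : q u = true
    · simp [hq]
    · simp [hq]

-- A's candidate-building loop, as a filterMap (generic foldl-add lemma)
lemma foldl_add_if_eq {α β : Type} [BEq α] [LawfulBEq α] (l : List β) (f : β → α) (p : β → Bool) :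
    ∀ s : PySem.Set α, (l.map f).Nodup → (∀ b ∈ l, f b ∉ s) →
      l.foldl (fun s b => if p b then PySem.Set.add s (f b) else s) s
        = s ++ l.filterMap (fun b => if p b then some (f b) else none) := by
  induction l with
  | nil => intro s _ _; simp
  | cons b l ih =>
    intro s hnd hdis
    simp only [List.foldl_cons, List.filterMap_cons]
    rw [List.map_cons, List.nodup_cons] at hnd
    have hnd' : (l.map f).Nodup := hnd.2
    have hfb : f b ∉ l.map f := hnd.1
    by_cases hp : p b = true
    · rw [if_pos hp, if_pos hp,
        PySem.Set.add_of_not_mem (hdis b (List.mem_cons_self)),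
        ih (s ++ [f b]) hnd' (fun b' hb' => by
          simp only [List.mem_append, List.mem_singleton]
          rintro (hmem | heq)
          · exact hdis b' (List.mem_cons_of_mem _ hb') hmem
          · exact hfb (heq ▸ List.mem_map_of_mem hb'))]

      simp
    · rw [if_neg hp, if_neg hp,
        ih s hnd' (fun b' hb' => hdis b' (List.mem_cons_of_mem _ hb'))]

lemma candForA_eq (bu : String) (users : List String) :
    candForA bu users
      = (PySem.List.enumerate users).filterMap
          (fun ju => if matchesB bu ju.2 then some ju.1 else none) := by
  unfold candForA
  rw [foldl_add_if_eq _ _ _ PySem.Set.empty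
    (List.Nodup.map (fun x y => by exact_mod_cast id) List.nodup_range)
    (fun b _ h => (List.not_mem_nil h).elim)]
  show PySem.Set.empty ++ _ = _
  rw [PySem.Set.empty, List.nil_append]
  rw [show (PySem.List.enumerate users : List (Int × String))
      = PySem.List.enumerate users ((0 : Nat) : Int) by norm_num]
  rw [filterMap_enumerate (matchesB bu) users 0]
  apply List.filterMap_congr
  intro j hj
  rw [guard_eq_matchesB]
  simp

-- membership in the foldl of a conditional add over a set
lemma mem_foldl_add_if {α β : Type} [BEq β] [LawfulBEq β] (l : List α) (p : α → Bool) (f : α → β) :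
    ∀ (s : PySem.Set β) (x : β),
      (x ∈ l.foldl (fun s e => if p e then PySem.Set.add s (f e) else s) s)
        ↔ x ∈ s ∨ ∃ e ∈ l, p e = true ∧ x = f e := by
  induction l with
  | nil => intro s x; simp
  | cons e l ih =>
    intro s x
    simp only [List.foldl_cons, List.mem_cons]
    rw [ih]
    by_cases hp : p e = true
    · rw [if_pos hp]
      constructor
      · rintro (hs | h)
        · rcases (PySem.Set.mem_add _ _ _).mp hs with hs | rfl
          · exact Or.inl hs
          · exact Or.inr ⟨e, Or.inl rfl, hp, rfl⟩
        · obtain ⟨e', he', hpe', rfl⟩ := h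
          exact Or.inr ⟨e', Or.inr he', hpe', rfl⟩
      · rintro (hs | ⟨e', (rfl | he'), hpe', rfl⟩)
        · exact Or.inl ((PySem.Set.mem_add _ _ _).mpr (Or.inl hs))
        · exact Or.inl ((PySem.Set.mem_add _ _ _).mpr (Or.inr rfl))
        · exact Or.inr ⟨e', he', hpe', rfl⟩
    · rw [if_neg hp]
      constructor
      · rintro (hs | ⟨e', he', hpe', rfl⟩)
        · exact Or.inl hs
        · exact Or.inr ⟨e', Or.inr he', hpe', rfl⟩
      · rintro (hs | ⟨e', (rfl | he'), hpe', rfl⟩)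
        · exact Or.inl hs
        · exact absurd hpe' hp
        · exact Or.inr ⟨e', he', hpe', rfl⟩

lemma nodup_foldl_add_if {α β : Type} [BEq β] [LawfulBEq β] (l : List α) (p : α → Bool) (f : α → β)
    (s : PySem.Set β) (h : s.Nodup) :
    (l.foldl (fun s e => if p e then PySem.Set.add s (f e) else s) s).Nodup := by
  induction l generalizing s with
  | nil => exact h
  | cons e l ih =>
    simp only [List.foldl_cons]
    by_cases hp : p e = true
    · rw [if_pos hp]; exact ih _ (PySem.Set.nodup_add _ _ h)
    · rw [if_neg hp]; exact ih _ h

-- len(set(sel)) == len(sel) iff sel has no duplicates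
lemma len_ofList_eq_iff {α : Type} [BEq α] [LawfulBEq α] (l : List α) :
    (PySem.Set.ofList l).length = l.length ↔ l.Nodup := by
  constructor
  · intro h
    by_contra hnd
    have : (PySem.Set.ofList l).length < l.length := by
      clear h
      induction l with
      | nil => exact absurd List.nodup_nil hnd
      | cons x xs ih =>
        rw [PySem.Set.ofList_cons, PySem.Set.discard]
        have hle : (PySem.Set.ofList xs).length ≤ xs.length := PySem.Set.length_ofList_le xs
        have hfle : ((PySem.Set.ofList xs).filter (fun y => !y == x)).length
            ≤ (PySem.Set.ofList xs).length := List.length_filter_le _ _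
        by_cases hx : x ∈ xs
        · have : ((PySem.Set.ofList xs).filter (fun y => !y == x)).length
              < (PySem.Set.ofList xs).length := by
            apply List.length_filter_lt_length_iff_exists.mpr
            exact ⟨x, (PySem.Set.mem_ofList _ _).mpr hx, by simp⟩
          simp only [List.length_cons]
          omega
        · have hnx : ¬ xs.Nodup := by
            simp only [List.nodup_cons] at hnd; tauto
          have := ih hnx
          simp only [List.length_cons]
          omega
    omega
  · intro h
    rw [PySem.Set.ofList_eq_self_of_nodup _ h]

-- the combos foldl builds exactly the picks
lemma mem_combos (cands : List (List Int)) (sel : List Int) :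
    sel ∈ cands.foldl (fun cs c => cs.flatMap fun s => c.map fun j => s ++ [j]) [([] : List Int)]
      ↔ Picks cands sel := by
  have aux : ∀ (cs : List (List Int)) (acc : List (List Int)) (sel : List Int),
      sel ∈ cs.foldl (fun cs c => cs.flatMap fun s => c.map fun j => s ++ [j]) acc
        ↔ ∃ p ∈ acc, ∃ q, Picks cs q ∧ sel = p ++ q := by
    intro cs
    induction cs with
    | nil =>
      intro acc sel
      simp only [List.foldl_nil, Picks, List.forall₂_nil_left_iff]
      constructor
      · intro h; exact ⟨sel, h, [], rfl, by simp⟩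
      · rintro ⟨p, hp, q, rfl, rfl⟩; simpa using hp
    | cons c rest ih =>
      intro acc sel
      simp only [List.foldl_cons]
      rw [ih]
      constructor
      · rintro ⟨p', hp', q, hq, rfl⟩
        rw [List.mem_flatMap] at hp'
        obtain ⟨p, hp, hp'mem⟩ := hp'
        rw [List.mem_map] at hp'mem
        obtain ⟨j, hj, rfl⟩ := hp'mem
        exact ⟨p, hp, j :: q, List.Forall₂.cons hj hq, by simp⟩
      · rintro ⟨p, hp, q, hq, rfl⟩
        rcases q with _ | ⟨j, q⟩
        · exact absurd hq (by simp [Picks])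
        · rw [Picks, List.forall₂_cons] at hq
          exact ⟨p ++ [j], List.mem_flatMap.mpr ⟨p, hp, List.mem_map.mpr ⟨j, hq.1, rfl⟩⟩,
            q, hq.2, by simp⟩
  rw [aux]
  constructor
  · rintro ⟨p, hp, q, hq, rfl⟩
    simp only [List.mem_singleton] at hp
    subst hp; simpa using hq
  · intro h; exact ⟨[], List.mem_singleton.mpr rfl, sel, h, rfl⟩

-- a foldl whose step only ever adds elements satisfying Q
lemma mem_foldl_step {α β : Type} (l : List α) (g : List β → α → List β) (Q : α → β → Prop)
    (hg : ∀ u ∈ l, ∀ (a : List β) (x : β), x ∈ g a u ↔ x ∈ a ∨ Q u x) :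
    ∀ (a : List β) (x : β), x ∈ l.foldl g a ↔ x ∈ a ∨ ∃ u ∈ l, Q u x := by
  induction l with
  | nil => intro a x; simp
  | cons u l ih =>
    intro a x
    rw [List.foldl_cons, ih (fun u' hu' => hg u' (List.mem_cons_of_mem _ hu')),
      hg u List.mem_cons_self]
    simp only [List.mem_cons]
    constructor
    · rintro ((hx | hq) | ⟨u', hu', hq⟩)
      · exact Or.inl hx
      · exact Or.inr ⟨u, Or.inl rfl, hq⟩
      · exact Or.inr ⟨u', Or.inr hu', hq⟩
    · rintro (hx | ⟨u', (rfl | hu'), hq⟩)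
      · exact Or.inl (Or.inl hx)
      · exact Or.inl (Or.inr hq)
      · exact Or.inr ⟨u', hu', hq⟩

-- a foldl whose step preserves Nodup
lemma nodup_foldl_pres {α β : Type} (l : List α) (g : List β → α → List β)
    (hg : ∀ (a : List β) (u : α), a.Nodup → (g a u).Nodup) :
    ∀ a : List β, a.Nodup → (l.foldl g a).Nodup := by
  induction l with
  | nil => exact fun a h => h
  | cons u l ih => intro a h; exact ih _ (hg a u h)

-- dfsA: membership characterization
lemma mem_dfsA (cands : List (PySem.Set Int)) :
    ∀ (v : PySem.Set Int) (ans : PySem.Set (List Int)) (x : List Int), v.Nodup →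
      (x ∈ dfsA cands v ans
        ↔ x ∈ ans ∨ ∃ sel, Picks cands sel ∧ sel.Nodup ∧ (∀ j ∈ sel, j ∉ v) ∧
            x = PySem.List.sorted (v ++ sel) (fun x => x) false) := by
  induction cands with
  | nil =>
    intro v ans x hv
    show x ∈ PySem.Set.add ans _ ↔ _
    rw [PySem.Set.mem_add _ _ _]
    simp [Picks, List.forall₂_nil_left_iff]
  | cons c rest ih =>
    intro v ans x hv
    show x ∈ c.foldl (fun ans u => if PySem.Set.contains v u then ans
        else dfsA rest (PySem.Set.add v u) ans) ans ↔ _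
    rw [mem_foldl_step c _
      (fun u x => u ∉ v ∧ ∃ sel, Picks rest sel ∧ sel.Nodup ∧
        (∀ j ∈ sel, j ∉ PySem.Set.add v u) ∧
        x = PySem.List.sorted (PySem.Set.add v u ++ sel) (fun x => x) false)
      (fun u _ a x => by
        by_cases hc : PySem.Set.contains v u = true
        · rw [if_pos hc]
          have huv : u ∈ v := (PySem.Set.contains_iff _ _).mp hc
          constructor
          · exact Or.inl
          · rintro (hx | ⟨hun, _⟩)
            · exact hx
            · exact absurd huv hun
        · rw [if_neg hc]
          have hun : u ∉ v := fun hm => hc ((PySem.Set.contains_iff _ _).mpr hm)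
          rw [ih (PySem.Set.add v u) a x (PySem.Set.nodup_add _ _ hv)]
          constructor
          · rintro (hx | hq)
            · exact Or.inl hx
            · exact Or.inr ⟨hun, hq⟩
          · rintro (hx | ⟨_, hq⟩)
            · exact Or.inl hx
            · exact Or.inr hq)]
    constructor
    · rintro (hx | ⟨u, hu, hunv, sel, hp, hnd, hfresh, rfl⟩)
      · exact Or.inl hx
      · refine Or.inr ⟨u :: sel, List.Forall₂.cons hu hp, ?_, ?_, ?_⟩
        · refine List.nodup_cons.mpr ⟨fun hus => ?_, hnd⟩
          exact hfresh u hus ((PySem.Set.mem_add _ _ _).mpr (Or.inr rfl))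
        · intro j hj
          rcases List.mem_cons.mp hj with rfl | hj'
          · exact hunv
          · exact fun hjv => hfresh j hj' ((PySem.Set.mem_add _ _ _).mpr (Or.inl hjv))
        · rw [PySem.Set.add_of_not_mem hunv, List.append_assoc, List.singleton_append]
    · rintro (hx | ⟨sel', hp, hnd, hfresh, rfl⟩)
      · exact Or.inl hx
      · obtain ⟨u, sel, hu, hp', rfl⟩ := List.forall₂_cons_left_iff.mp hp
        have hus : u ∉ sel := (List.nodup_cons.mp hnd).1
        have hunv : u ∉ v := hfresh u List.mem_cons_self
        refine Or.inr ⟨u, hu, hunv, sel, hp', (List.nodup_cons.mp hnd).2, ?_, ?_⟩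
        · intro j hj hjm
          rcases (PySem.Set.mem_add _ _ _).mp hjm with hjv | rfl
          · exact hfresh j (List.mem_cons_of_mem _ hj) hjv
          · exact hus hj
        · rw [PySem.Set.add_of_not_mem hunv, List.append_assoc, List.singleton_append]

lemma nodup_dfsA (cands : List (PySem.Set Int)) :
    ∀ (v : PySem.Set Int) (ans : PySem.Set (List Int)), ans.Nodup → (dfsA cands v ans).Nodup := by
  induction cands with
  | nil => intro v ans h; exact PySem.Set.nodup_add _ _ h
  | cons c rest ih =>
    intro v ans h
    show (c.foldl (fun ans u => if PySem.Set.contains v u then ans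
        else dfsA rest (PySem.Set.add v u) ans) ans).Nodup
    refine nodup_foldl_pres c _ (fun a u ha => ?_) ans h
    by_cases hc : PySem.Set.contains v u = true
    · rwa [if_pos hc]
    · rw [if_neg hc]; exact ih _ a ha

-- ===== VERDICT (by name: the statement is the Claim_ definition above) =====
theorem solution_spec : Claim_equal_solution := by
  unfold Claim_equal_solution
  intro user_id banned_id _
  unfold Spec_solution solution solution_alt
  have hmapeq : banned_id.map (fun bu => candForA bu user_id)
      = banned_id.map (fun p => (PySem.List.enumerate user_id).filterMap
          fun ju => if matchesB p ju.2 then some ju.1 else none) :=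
    List.map_congr_left (fun bu _ => candForA_eq bu user_id)
  set cands := banned_id.map (fun p => (PySem.List.enumerate user_id).filterMap
      fun ju => if matchesB p ju.2 then some ju.1 else none) with hcands
  rw [hmapeq]
  set combos := cands.foldl (fun cs c => cs.flatMap fun sel => c.map fun j => sel ++ [j])
    [([] : List Int)] with hcombos
  set SA := dfsA cands PySem.Set.empty PySem.Set.empty with hSA
  set SB := combos.foldl
    (fun s sel => if (PySem.Set.ofList sel).length == banned_id.length
      then PySem.Set.add s (PySem.List.sorted sel (fun x => x) false) else s)
    PySem.Set.empty with hSB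
  have hA : ∀ x, x ∈ SA ↔ ∃ sel, Picks cands sel ∧ sel.Nodup ∧
      x = PySem.List.sorted sel (fun x => x) false := by
    intro x
    rw [hSA, mem_dfsA cands PySem.Set.empty PySem.Set.empty x List.nodup_nil]
    constructor
    · rintro (hx | ⟨sel, hp, hnd, _, rfl⟩)
      · exact absurd hx (List.not_mem_nil)
      · exact ⟨sel, hp, hnd, by simp [PySem.Set.empty]⟩
    · rintro ⟨sel, hp, hnd, rfl⟩
      exact Or.inr ⟨sel, hp, hnd, fun j _ h => List.not_mem_nil h, by simp [PySem.Set.empty]⟩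
  have hB : ∀ x, x ∈ SB ↔ ∃ sel, Picks cands sel ∧ sel.Nodup ∧
      x = PySem.List.sorted sel (fun x => x) false := by
    intro x
    rw [hSB, mem_foldl_add_if combos
      (fun sel => (PySem.Set.ofList sel).length == banned_id.length)
      (fun sel => PySem.List.sorted sel (fun x => x) false) PySem.Set.empty x]
    constructor
    · rintro (hx | ⟨sel, hmem, hcond, rfl⟩)
      · exact absurd hx (List.not_mem_nil)
      · have hp : Picks cands sel := (mem_combos cands sel).mp hmem
        have hlen : sel.length = banned_id.length := by
          have h1 := List.Forall₂.length_eq hp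
          rw [hcands, List.length_map] at h1
          exact h1.symm
        refine ⟨sel, hp, ?_, rfl⟩
        have h2 : (PySem.Set.ofList sel).length = banned_id.length := by simpa using hcond
        rw [← hlen] at h2
        exact (len_ofList_eq_iff sel).mp h2
    · rintro ⟨sel, hp, hnd, rfl⟩
      have hlen : sel.length = banned_id.length := by
        have h1 := List.Forall₂.length_eq hp
        rw [hcands, List.length_map] at h1
        exact h1.symm
      refine Or.inr ⟨sel, (mem_combos cands sel).mpr hp, ?_, rfl⟩
      simp only [beq_iff_eq]
      rw [(len_ofList_eq_iff sel).mpr hnd, hlen]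
  have hndA : SA.Nodup := nodup_dfsA cands PySem.Set.empty PySem.Set.empty List.nodup_nil
  have hndB : SB.Nodup := nodup_foldl_add_if combos _ _ PySem.Set.empty List.nodup_nil
  have hperm : SA.Perm SB :=
    (List.perm_ext_iff_of_nodup hndA hndB).mpr (fun x => (hA x).trans (hB x).symm)
  show PySem.Set.len SA = PySem.Set.len SB
  simp [PySem.Set.len, hperm.length_eq]
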